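/- GENERATED by mk_final_copies.py from the proof of the farm's unit `stb_vorbis_get_frame_float.2` (farm:stb_vorbis_get_frame_float.2.1: Proof.lean) as the
   re-elaboration sweep compiled it — do not edit. -/
import Asan.CheckWalk
import Vorbis.Spec.Units.stb_vorbis_get_frame_float_2
import Vorbis.Spec.Worked.stb_vorbis_get_frame_float_2_Lemmas

open X86 X86.User Asan Vorbis Vorbis.Spec

set_option maxRecDepth 4000
set_option maxHeartbeats 4000000

/-- **Segment 2 of `stb_vorbis_get_frame_float`** (`cut1` 119737H → `cut2` 1197A7H | the epilogue's head `at_119769`; C lines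
5060–5065). From the assertion `AtCut1` after the call of vorbis_decode_packet: `test eax, eax ; jne`.
ZERO PATH (eax = 0): `mov ebp, eax`, then `f->channel_buffer_start = f->channel_buffer_end = 0`: two checked 4-byte stores into
`[f+1796, f+1804)` (the checks by `DecodeInv.objLive`, the decode-time invariant over the stores by `decodeInv_stores`), to
`AtEpi … 0`. NORMAL PATH (eax ≠ 0): the three locals `right`, `left`, `len` are loaded (`R − 104`, `R − 88`, `R − 120`), W3′ for
them from `AtCut1.w3` (`Top.W3Mem.w3At`), the call of vorbis_finish_frame, and `AtCut2 left r` from its postcondition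
(`seg2_result`). A SEGMENT proof: the walk starts at `v`; `u` is the function's entry state. -/
theorem Vorbis.Spec.Worked.stb_vorbis_get_frame_float_2_ok : Vorbis.Spec.stb_vorbis_get_frame_float_2.Statement := by
  intro Lay hLay μ hμ u₀ hcode hstore4 h_vff others frames len A stored room ysz u ret f v hat
  -- 1. the assertion at `cut1`, field by field; the ENTRY state's facts from the `AtEntry` it carries (he_… are about `u`)
  obtain ⟨j_rip, ⟨hfr, j_rbx, k_ch, k_out⟩, hw3⟩ := hat
  have he := hfr.entry
  have hpre := hfr.pre
  have hfr0 := hfr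
  v_entry he
  obtain ⟨hsh, hdi0, hpc, hpo, hapart⟩ := hpre
  obtain ⟨_, _, hf, j_rsp, j_r14, k15, k14, k13, k12, kbp, kbx, k0, hsame, j_code, j_inv, hinv, hdi⟩ := hfr
  -- the callee's contract for the frame list WITH the own protected frame
  have hvff := h_vff others (stb_vorbis_get_frame_float.ownFrames u frames) len A stored room ysz
  -- 2. the present state `v` under the names the walker reads (`c_…` stay rewrite rules for the whole walk)
  have w_rip := j_rip
  have c_rsp : v.reg .rsp = u.reg .rsp - 184 := j_rsp
  have c_rbx : v.reg .rbx = u.reg .rdi := j_rbx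
  have w_eq := Vorbis.conv_code_eqOn j_code
  have hdf : v.flags .df = false := (show abiInv _ from j_inv).1
  have hmx : v.mxcsr &&& 0x1F80 = 0x1F80 := (show abiInv _ from j_inv).2
  have hsse := Vorbis.sseOK_of_abiInv j_inv
  have w_kept : RegsKept [.rsp] v v := RegsKept.refl _ _
  -- where `*f` and the arena are, as arithmetic; `*f` is one live object (OB1)
  have hwF := stb_vorbis_get_frame_float.gff_obj_where hdi
  have hwA := stb_vorbis_get_frame_float.gff_arena_where hdi
  have hlive := hdi.objLive
  simp only [Vorbis.Off.sizeof.stb_vorbis] at hlive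
  clear hpc hpo hapart
  -- 3. the three locals the normal path loads: `right` = [rsp+50H] = R − 104, `left` = [rsp+60H] = R − 88, `len` = [rsp+40H] = R − 120
  obtain ⟨vr, hvr⟩ : ∃ vr, v.mem.readLE (u.reg .rsp - 104) 4 = vr := ⟨_, rfl⟩
  obtain ⟨vl, hvl⟩ : ∃ vl, v.mem.readLE (u.reg .rsp - 88) 4 = vl := ⟨_, rfl⟩
  obtain ⟨vn, hvn⟩ : ∃ vn, v.mem.readLE (u.reg .rsp - 120) 4 = vn := ⟨_, rfl⟩
  have hvr32 : vr < 2 ^ 32 := by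
    rw [← hvr]
    exact X86.User.Mem.readLE_lt' _ _ 4
  have hvl32 : vl < 2 ^ 32 := by
    rw [← hvl]
    exact X86.User.Mem.readLE_lt' _ _ 4
  have hvn32 : vn < 2 ^ 32 := by
    rw [← hvn]
    exact X86.User.Mem.readLE_lt' _ _ 4
  -- `blocksize_1` as a raw read at the machine's address of the field
  have eb : ∀ m : Mem, stb_vorbis.blocksize_1 m f = sint32 (m.readLE (u.reg .rdi + 156) 4) := by
    intro m
    simp only [vacc, voff]
    unfold Mem.i32 Mem.u32
    rw [← addr_add_lit, ← eq_addr _ _ hf]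
  obtain ⟨b1, hb1⟩ : ∃ b1, v.mem.readLE (u.reg .rdi + 156) 4 = b1 := ⟨_, rfl⟩
  -- W3′ for the three locals if eax ≠ 0
  have hfp : ¬ (Word.part .w32 (v.reg .rax)).toNat = 0 → FinishPre (sint32 b1) (sint32 vn) (sint32 vl) (sint32 vr) := by
    intro hne
    have h3 := (hw3 (Vorbis.Spec.stb_vorbis_get_frame_float_2.seg2_s32_ne _ hne)).w3At
    unfold W3At at h3
    rw [eb, hb1] at h3
    rw [Vorbis.Spec.stb_vorbis_get_frame_float_2.seg2_i32_slot v.mem (u.reg .rsp - 120) _ (by u_omega), hvn] at h3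
    rw [Vorbis.Spec.stb_vorbis_get_frame_float_2.seg2_i32_slot v.mem (u.reg .rsp - 88) _ (by u_omega), hvl] at h3
    rw [Vorbis.Spec.stb_vorbis_get_frame_float_2.seg2_i32_slot v.mem (u.reg .rsp - 104) _ (by u_omega), hvr] at h3
    exact h3
  clear hw3
  -- 4. the walk: 119737H `test eax, eax ; jne 119793H`, both arms
  u_walk hcode [hμ.vendor] until [Vorbis.L.stb_vorbis_get_frame_float.at_119769, Vorbis.L.stb_vorbis_get_frame_float.cut2] span [Vorbis.L.textLo, Vorbis.L.textHi] side (v_side)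
  · -- 1197A2H `call vorbis_finish_frame` (line 5065): DF / MXCSR at the call
    v_inv
  · -- 1197A2H: the precondition of vorbis_finish_frame (the shadow layer and the decode-time invariant over the pushed return
    -- address, W3′ for the three loaded locals)
    have hfp' := hfp hbr_119739
    have e_rsp : (s_1197a2.reg .rsp).toNat + 8 = (u.reg .rsp).toNat - 184 := by
      rw [w_rsp]
      u_omega
    have hun : ShadowUntouched v.mem s_1197a2.mem := by v_untouched
    have hinv' := hinv.untouched hun
    have hst : Mem.SameExcept [⟨(u.reg .rsp).toNat - 192, (u.reg .rsp).toNat - 184⟩] v.mem s_1197a2.mem := by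
      u_same
    have hdi' := stb_vorbis_get_frame_float.decodeInv_stores hdi hinv' hst (by
      intro w hw
      simp only [List.mem_cons, List.not_mem_nil, or_false] at hw
      subst hw
      left
      simp only []
      omega)
    have hb1' : s_1197a2.mem.readLE (u.reg .rdi + 156) 4 = b1 := by u_frame hb1
    refine ⟨⟨?_, hsh.offText⟩, ?_, ?_⟩
    · rw [e_rsp]
      exact hinv'
    · rw [w_rdi, hf]
      exact hdi'
    · rw [w_rdi, hf, w_rsi, w_rdx, w_rcx, eb, hb1']
      rw [Vorbis.Spec.stb_vorbis_get_frame_float_2.seg2_s32_load vn hvn32,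
        Vorbis.Spec.stb_vorbis_get_frame_float_2.seg2_s32_load vl hvl32,
        Vorbis.Spec.stb_vorbis_get_frame_float_2.seg2_s32_load vr hvr32]
      exact hfp'
  · -- 119744H: the check of `f->channel_buffer_end = 0` (line 5061; `f + 1800` inside `*f`)
    have hun : ShadowUntouched v.mem s_119744.mem := by v_untouched
    exact hlive.accSmall hinv hun _ 4 (by decide) (by u_omega) (by u_omega)
  · -- 11975AH: the check of `f->channel_buffer_start = 0` (line 5061; `f + 1796` inside `*f`)
    have hun : ShadowUntouched v.mem s_11975a.mem := by v_untouched
    exact hlive.accSmall hinv hun _ 4 (by decide) (by u_omega) (by u_omega)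
  · -- 1197A7H = `cut2`: after the call (line 5065), the assertion `AtCut2 left r` from the callee's footprint and postcondition
    have hfp' := hfp hbr_119739
    simp only [X86.User.Spec.footprint, vspec, w_rsp_1197a2] at w_same
    obtain ⟨hun1, hdi1, hds, hres, hrax⟩ := w_post
    rw [w_rdi_1197a2, hf] at hdi1 hds hres
    rw [w_rsi_1197a2, w_rdx_1197a2, w_rcx_1197a2] at hres
    rw [Vorbis.Spec.stb_vorbis_get_frame_float_2.seg2_s32_load vn hvn32,
      Vorbis.Spec.stb_vorbis_get_frame_float_2.seg2_s32_load vl hvl32,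
      Vorbis.Spec.stb_vorbis_get_frame_float_2.seg2_s32_load vr hvr32] at hres
    -- the shadow layer: the push of the return address and the callee wrote no shadow byte
    have hun0 : ShadowUntouched v.mem s_1197a2.mem := by
      rw [w_mem_1197a2]
      v_untouched
    have hinv1 := (hinv.untouched hun0).untouched hun1
    have hb1' : s_1197a2.mem.readLE (u.reg .rdi + 156) 4 = b1 := by
      rw [w_mem_1197a2]
      u_frame hb1
    -- the stack slots, read through the callee's footprint (its 144 bytes of stack below R − 192, the arena)
    rw [w_mem_1197a2] at w_same
    have hs15 : UInt64.ofNat (s_1197a2r.mem.readLE (u.reg .rsp - 8) 8) = u.reg .r15 := by u_frame k15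
    have hs14 : UInt64.ofNat (s_1197a2r.mem.readLE (u.reg .rsp - 16) 8) = u.reg .r14 := by u_frame k14
    have hs13 : UInt64.ofNat (s_1197a2r.mem.readLE (u.reg .rsp - 24) 8) = u.reg .r13 := by u_frame k13
    have hs12 : UInt64.ofNat (s_1197a2r.mem.readLE (u.reg .rsp - 32) 8) = u.reg .r12 := by u_frame k12
    have hsbp : UInt64.ofNat (s_1197a2r.mem.readLE (u.reg .rsp - 40) 8) = u.reg .rbp := by u_frame kbp
    have hsbx : UInt64.ofNat (s_1197a2r.mem.readLE (u.reg .rsp - 48) 8) = u.reg .rbx := by u_frame kbx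
    have hs0 : UInt64.ofNat (s_1197a2r.mem.readLE (u.reg .rsp) 8) = ret := by u_frame k0
    have hsch : UInt64.ofNat (s_1197a2r.mem.readLE (u.reg .rsp - 176) 8) = u.reg .rsi := by u_frame k_ch
    have hsou : UInt64.ofNat (s_1197a2r.mem.readLE (u.reg .rsp - 168) 8) = u.reg .rdx := by u_frame k_out
    have hsl : s_1197a2r.mem.readLE (u.reg .rsp - 88) 4 = vl := by u_frame hvl
    -- the footprint so far (the contract's five windows), over the carried `same`
    have hsame' : Mem.SameExcept [⟨(u.reg .rsp).toNat - 4240, (u.reg .rsp).toNat⟩, ⟨A.B, A.B + A.L⟩, ⟨0xC00000, 0xE00000⟩,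
        ⟨(u.reg .rsi).toNat, (u.reg .rsi).toNat + 4⟩, ⟨(u.reg .rdx).toNat, (u.reg .rdx).toNat + 8⟩] u.mem s_1197a2r.mem := by
      u_same
    have e14 : s_1197a2r.reg .r14 = (u.reg .rsp - 152) >>> 3 := by
      rw [w_kept .r14 rfl]
      exact j_r14
    have ebx : s_1197a2r.reg .rbx = u.reg .rdi := by
      rw [w_kept .rbx rfl]
      exact j_rbx
    have hframe : stb_vorbis_get_frame_float.GFrame others frames len A stored room ysz u₀ u ret f s_1197a2r :=
      ⟨hfr0.entry, hfr0.pre, hf, w_rsp, e14, hs15, hs14, hs13, hs12, hsbp, hsbx, hs0, hsame', w_code, w_inv, hinv1, hdi1⟩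
    -- the result: `0 ≤ r`, `left + r ≤ blocksize_1` (`FinishPre.result`), `r < 2 ^ 31` since rax is zero-extended
    obtain ⟨hr0, hrb⟩ := Vorbis.Spec.stb_vorbis_get_frame_float_2.seg2_result hfp' hres
    obtain ⟨hr31, hrs⟩ := Vorbis.Spec.stb_vorbis_get_frame_float_2.seg2_rax_small _ hrax hr0
    have hl31 : vl < 2 ^ 31 := by
      have h0 := hfp'.left_nonneg
      have hc := sint32_cases vl
      omega
    refine ReachVia.done (Or.inl ⟨vl, (s_1197a2r.reg .rax).toNat, w_rip, ⟨hframe, ebx, hsch, hsou⟩, ?_, hr31, hsl, hl31, ?_⟩)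
    · -- `rax = r`
      exact UInt64.ofNat_toNat.symm
    · -- `left + r ≤ blocksize_1` in the memory after the call (`blocksize_1` is none of the decode-time holes)
      have e1 : stb_vorbis.blocksize_1 s_1197a2r.mem f = stb_vorbis.blocksize_1 s_1197a2.mem f := by
        simp only [vacc, voff]
        exact hds.i32 156 (by decide)
      rw [e1, eb, hb1']
      have hc := sint32_cases vl
      omega
  · -- 119769H = `at_119769`: the zero path (lines 5060–5062: `mov ebp, eax`, the two stores of 0), the assertion `AtEpi … 0`
    refine ReachVia.done (Or.inr ?_)
    -- DF / MXCSR first: `v_inv` searches the context, which the slot facts below make expensive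
    have habi : (conv u₀).inv s_11975f := by v_inv
    clear hwA hvr32 hvl32 hvn32 hfp hb1 hvr hvl hvn hlive eb
    have hun : ShadowUntouched v.mem s_11975f.mem := by v_untouched
    have hinv' := hinv.untouched hun
    -- the decode-time invariant over the segment's stores: the checks' return addresses, the two holes of `*f`
    have hst : Mem.SameExcept [⟨(u.reg .rsp).toNat - 192, (u.reg .rsp).toNat - 184⟩, ⟨f + 1796, f + 1804⟩] v.mem s_11975f.mem := by
      u_same
    have hdi' := stb_vorbis_get_frame_float.decodeInv_stores hdi hinv' hst (by
      intro w hw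
      simp only [List.mem_cons, List.not_mem_nil, or_false] at hw
      rcases hw with rfl | rfl
      · left
        simp only []
        omega
      · right
        right
        simp only []
        omega)
    have hs15 : UInt64.ofNat (s_11975f.mem.readLE (u.reg .rsp - 8) 8) = u.reg .r15 := by u_frame k15
    have hs14 : UInt64.ofNat (s_11975f.mem.readLE (u.reg .rsp - 16) 8) = u.reg .r14 := by u_frame k14
    have hs13 : UInt64.ofNat (s_11975f.mem.readLE (u.reg .rsp - 24) 8) = u.reg .r13 := by u_frame k13
    have hs12 : UInt64.ofNat (s_11975f.mem.readLE (u.reg .rsp - 32) 8) = u.reg .r12 := by u_frame k12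
    have hsbp : UInt64.ofNat (s_11975f.mem.readLE (u.reg .rsp - 40) 8) = u.reg .rbp := by u_frame kbp
    have hsbx : UInt64.ofNat (s_11975f.mem.readLE (u.reg .rsp - 48) 8) = u.reg .rbx := by u_frame kbx
    have hs0 : UInt64.ofNat (s_11975f.mem.readLE (u.reg .rsp) 8) = ret := by u_frame k0
    have hsame' : Mem.SameExcept [⟨(u.reg .rsp).toNat - 4240, (u.reg .rsp).toNat⟩, ⟨A.B, A.B + A.L⟩, ⟨0xC00000, 0xE00000⟩,
        ⟨(u.reg .rsi).toNat, (u.reg .rsi).toNat + 4⟩, ⟨(u.reg .rdx).toNat, (u.reg .rdx).toNat + 8⟩] u.mem s_11975f.mem := by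
      u_same
    have e14 : s_11975f.reg .r14 = (u.reg .rsp - 152) >>> 3 := by
      rw [w_kept .r14 rfl]
      exact j_r14
    have hframe : stb_vorbis_get_frame_float.GFrame others frames len A stored room ysz u₀ u ret f s_11975f :=
      ⟨hfr0.entry, hfr0.pre, hf, w_rsp, e14, hs15, hs14, hs13, hs12, hsbp, hsbx, hs0, hsame', Vorbis.conv_code_in w_eq, habi, hinv', hdi'⟩
    refine ⟨w_rip, hframe, ?_, by decide, fun h => absurd rfl h⟩
    -- `ebp = 0`: the branch fact says eax = 0
    rw [w_rbp]
    exact Vorbis.Spec.stb_vorbis_get_frame_float_2.seg2_ofBV_zero _ hbr_119739
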